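-- pv_equiv track=rewrite | github.com/ReneGRomCodes/FCC_daily_coding_challenges | 09-25/22-09-25 Digits vs Letters.py | digits_or_letters
-- ===== SOURCE A (Python) =====
-- def digits_or_letters(s: str) -> str:
--     n_digits: int = len([char for char in s if char.isnumeric()])
--     n_letters: int = len([char for char in s if char.isalpha()])
--
--     if n_digits > n_letters:
--         return "digits"
--     elif n_digits < n_letters:
--         return "letters"
--
--     return "tie"
-- ===== SOURCE B (Python) =====
-- def digits_or_letters(s: str) -> str:
--     # Single signed balance: +1 per numeric char, -1 per alphabetic char.
--     # Correct because isnumeric and isalpha are disjoint, so the balance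
--     # equals n_digits - n_letters and only its sign matters.
--     balance = sum(1 if c.isnumeric() else -1 if c.isalpha() else 0 for c in s)
--     if balance > 0:
--         return "digits"
--     if balance < 0:
--         return "letters"
--     return "tie"
-- ===== Notes on version B (the rewrite author's own statement) =====
-- stated objective: simpler
-- what changed: Instead of building two filtered lists and comparing their lengths, B maintains a single signed balance (+1 per numeric char, -1 per alphabetic char, relying on the two predicates being disjoint) and decides by the sign of the balance.
import Mathlib
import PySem

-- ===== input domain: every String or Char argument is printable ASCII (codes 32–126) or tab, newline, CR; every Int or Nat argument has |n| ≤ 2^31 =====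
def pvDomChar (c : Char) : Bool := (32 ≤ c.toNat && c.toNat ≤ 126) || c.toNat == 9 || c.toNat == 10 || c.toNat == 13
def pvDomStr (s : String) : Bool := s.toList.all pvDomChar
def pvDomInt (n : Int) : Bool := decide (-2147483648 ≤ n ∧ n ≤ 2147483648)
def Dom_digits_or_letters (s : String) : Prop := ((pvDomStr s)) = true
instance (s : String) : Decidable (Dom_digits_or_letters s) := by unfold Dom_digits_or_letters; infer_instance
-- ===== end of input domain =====

-- B replaces A's two filtered lists + length comparison by a single signed balance
-- (+1 per digit, -1 per letter; the predicates are disjoint) decided by its sign (simpler).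
-- ===== PORT A =====
def digits_or_letters (s : String) : String :=
  let n_digits : Int := (s.toList.filter (fun char => PySem.Chars.isdigit char)).length
  let n_letters : Int := (s.toList.filter (fun char => PySem.Chars.isalpha char)).length
  if n_digits > n_letters then "digits"
  else if n_digits < n_letters then "letters"
  else "tie"

-- ===== PORT B =====
def digits_or_letters_alt (s : String) : String :=
  let balance : Int := s.toList.foldl
    (fun (b : Int) c =>
      b + (if PySem.Chars.isdigit c then 1 else if PySem.Chars.isalpha c then -1 else 0))
    0
  if balance > 0 then "digits"
  else if balance < 0 then "letters"
  else "tie"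

-- ===== PRECONDITION & SPEC =====
def Spec_digits_or_letters (s : String) (out : String) : Prop := out = digits_or_letters_alt s
instance (s : String) (out : String) : Decidable (Spec_digits_or_letters s out) := by unfold Spec_digits_or_letters; infer_instance

-- ===== CLAIM (what is proved, stated in full; the proofs are below) =====
def Claim_equal_digits_or_letters : Prop := ∀ (s : String), Dom_digits_or_letters s → Spec_digits_or_letters s (digits_or_letters s)

-- ===== LEMMAS AND PROOFS =====

-- an ASCII digit is never a letter
theorem pv_digit_not_alpha (c : Char) :
    PySem.Chars.isdigit c = true → PySem.Chars.isalpha c = false := by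
  simp only [PySem.Chars.isdigit, PySem.Chars.isalpha, PySem.Chars.isupper, PySem.Chars.islower,
    Bool.and_eq_true, Bool.or_eq_false_iff, Bool.and_eq_false_iff, decide_eq_true_eq,
    decide_eq_false_iff_not, Char.le_def, UInt32.le_iff_toNat_le]
  intro h1
  refine ⟨Or.inl ?_, Or.inl ?_⟩ <;> simp_all <;> omega

-- the balance loop computes #digits - #letters
theorem pv_fold_balance (l : List Char) (b : Int) :
    l.foldl
      (fun (b : Int) c =>
        b + (if PySem.Chars.isdigit c then 1 else if PySem.Chars.isalpha c then -1 else 0)) b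
    = b + ((l.filter (fun c => PySem.Chars.isdigit c)).length : Int)
        - ((l.filter (fun c => PySem.Chars.isalpha c)).length : Int) := by
  induction l generalizing b with
  | nil => simp
  | cons c t ih =>
    simp only [List.foldl_cons, ih, List.filter_cons]
    by_cases hd : PySem.Chars.isdigit c = true
    · have ha := pv_digit_not_alpha c hd
      simp [hd, ha]; push_cast; ring
    · by_cases ha : PySem.Chars.isalpha c = true <;>
        simp [hd, ha] <;> push_cast <;> ring

-- ===== VERDICT (by name: the statement is the Claim_ definition above) =====
theorem digits_or_letters_spec : Claim_equal_digits_or_letters := by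
  intro s _
  unfold Spec_digits_or_letters digits_or_letters digits_or_letters_alt
  rw [pv_fold_balance]
  set D := ((s.toList.filter (fun c => PySem.Chars.isdigit c)).length : Int)
  set L := ((s.toList.filter (fun c => PySem.Chars.isalpha c)).length : Int)
  simp only []
  split_ifs <;> simp_all <;> omega
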